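-- pv_equiv track=rewrite | github.com/ayushrai-hub/daily-challenge | app/services/tag_mapper.py | get_additional_parents
-- ===== SOURCE A (Python) =====
-- from typing import List, Dict, Optional, Tuple, Set
--
-- TAG_CATEGORIES = {
--     "Languages": ["python", "javascript", "typescript", "java", "c++", "c#", "go", "rust", "php", "ruby", "swift", "kotlin"],
--     "Frameworks": ["react", "angular", "vue", "node.js", "express", "django", "flask", "fastapi", "rails"],
--     "Databases": ["sql", "mongodb", "postgresql", "mysql", "redis"],
--     "Frontend": ["html", "css", "react", "angular", "vue", "typescript"],
--     "Backend": ["python", "node.js", "java", "c#", "php", "go", "rust", "express", "django", "flask", "fastapi"],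
--     "DevOps": ["docker", "kubernetes", "aws", "azure", "gcp", "git"],
--     "Algorithms": ["sorting", "searching", "dynamic programming", "greedy", "recursion", "backtracking"],
--     "Data Structures": ["arrays", "linked lists", "trees", "graphs", "hash tables", "stacks", "queues"],
--     "Code Quality": ["clean code", "testing", "refactoring", "design patterns", "code review"]
-- }
--
-- def get_additional_parents(tag_name: str) -> List[str]:
--     """
--     Get additional parent categories for a tag based on its name.
--     This supports multi-parent relationships in the tag hierarchy.
--
--     Args:
--         tag_name: The name of the tag to find additional parents for
--
--     Returns:
--         List of parent category names that this tag should belong to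
--     """
--     # Normalize the tag name for consistent lookup
--     tag_name_lower = tag_name.lower()
--
--     # Initialize empty list of parent categories
--     additional_parents = []
--
--     # Look through all category definitions to find which ones this tag should belong to
--     for category, tags in TAG_CATEGORIES.items():
--         if tag_name_lower in [t.lower() for t in tags]:
--             # This tag belongs in this category
--             additional_parents.append(category)
--
--     # Special case handling for common multi-category technologies
--     if tag_name_lower in ["typescript", "javascript"]:
--         additional_parents.extend(["Languages", "Frontend"])
--     elif tag_name_lower in ["python", "java"]:
--         additional_parents.extend(["Languages", "Backend"])
--     elif tag_name_lower == "node.js" or tag_name_lower == "nodejs":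
--         additional_parents.extend(["Frameworks", "Backend"])
--     elif tag_name_lower in ["react", "angular", "vue", "vue.js"]:
--         additional_parents.extend(["Frameworks", "Frontend"])
--     elif tag_name_lower in ["django", "flask", "fastapi", "express"]:
--         additional_parents.extend(["Frameworks", "Backend"])
--
--     # Remove duplicates while preserving order
--     unique_parents = []
--     for parent in additional_parents:
--         if parent not in unique_parents:
--             unique_parents.append(parent)
--
--     return unique_parents
-- ===== SOURCE B (Python) =====
-- from typing import List
--
-- TAG_CATEGORIES = {
--     "Languages": ["python", "javascript", "typescript", "java", "c++", "c#", "go", "rust", "php", "ruby", "swift", "kotlin"],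
--     "Frameworks": ["react", "angular", "vue", "node.js", "express", "django", "flask", "fastapi", "rails"],
--     "Databases": ["sql", "mongodb", "postgresql", "mysql", "redis"],
--     "Frontend": ["html", "css", "react", "angular", "vue", "typescript"],
--     "Backend": ["python", "node.js", "java", "c#", "php", "go", "rust", "express", "django", "flask", "fastapi"],
--     "DevOps": ["docker", "kubernetes", "aws", "azure", "gcp", "git"],
--     "Algorithms": ["sorting", "searching", "dynamic programming", "greedy", "recursion", "backtracking"],
--     "Data Structures": ["arrays", "linked lists", "trees", "graphs", "hash tables", "stacks", "queues"],
--     "Code Quality": ["clean code", "testing", "refactoring", "design patterns", "code review"]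
-- }
--
-- # Inverted index, built once: lowered tag -> ordered list of categories containing it.
-- _INDEX = {}
-- for _cat, _tags in TAG_CATEGORIES.items():
--     for _t in _tags:
--         _k = _t.lower()
--         _INDEX[_k] = _INDEX.get(_k, []) + [_cat]
--
-- # Table of the hard-coded multi-category extensions.
-- _SPECIAL = {
--     "typescript": ["Languages", "Frontend"],
--     "javascript": ["Languages", "Frontend"],
--     "python": ["Languages", "Backend"],
--     "java": ["Languages", "Backend"],
--     "node.js": ["Frameworks", "Backend"],
--     "nodejs": ["Frameworks", "Backend"],
--     "react": ["Frameworks", "Frontend"],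
--     "angular": ["Frameworks", "Frontend"],
--     "vue": ["Frameworks", "Frontend"],
--     "vue.js": ["Frameworks", "Frontend"],
--     "django": ["Frameworks", "Backend"],
--     "flask": ["Frameworks", "Backend"],
--     "fastapi": ["Frameworks", "Backend"],
--     "express": ["Frameworks", "Backend"],
-- }
--
-- def get_additional_parents(tag_name: str) -> List[str]:
--     tag_name_lower = tag_name.lower()
--     parents = _INDEX.get(tag_name_lower, []) + _SPECIAL.get(tag_name_lower, [])
--     return list(dict.fromkeys(parents))
-- ===== Notes on version B (the rewrite author's own statement) =====
-- stated objective: idiomatic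
-- what changed: Replaces the per-call scan over all TAG_CATEGORIES and the if/elif special-case chain by two module-level precomputed tables (an inverted index tag->categories and a special-case dict), and the hand-written order-preserving dedup loop by list(dict.fromkeys(...)); each call is two dict lookups plus a dedup.
import Mathlib
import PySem

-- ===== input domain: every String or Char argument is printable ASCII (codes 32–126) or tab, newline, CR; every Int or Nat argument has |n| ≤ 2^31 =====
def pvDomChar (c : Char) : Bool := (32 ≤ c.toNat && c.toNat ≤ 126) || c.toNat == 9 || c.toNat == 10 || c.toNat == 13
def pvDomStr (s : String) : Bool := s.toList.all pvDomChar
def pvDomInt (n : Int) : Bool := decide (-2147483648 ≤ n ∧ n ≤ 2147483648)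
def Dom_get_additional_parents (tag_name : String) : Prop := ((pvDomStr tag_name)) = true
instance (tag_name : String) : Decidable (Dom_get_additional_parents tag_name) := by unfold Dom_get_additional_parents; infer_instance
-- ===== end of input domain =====

-- B replaces A's per-call scan over all categories by a precomputed inverted index plus a
-- special-case table, and the dedup loop by dict.fromkeys (objective: idiomatic).

-- ===== PORT A =====
def TAG_CATEGORIES : List (String × List String) := [
  ("Languages", ["python", "javascript", "typescript", "java", "c++", "c#", "go", "rust", "php", "ruby", "swift", "kotlin"]),
  ("Frameworks", ["react", "angular", "vue", "node.js", "express", "django", "flask", "fastapi", "rails"]),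
  ("Databases", ["sql", "mongodb", "postgresql", "mysql", "redis"]),
  ("Frontend", ["html", "css", "react", "angular", "vue", "typescript"]),
  ("Backend", ["python", "node.js", "java", "c#", "php", "go", "rust", "express", "django", "flask", "fastapi"]),
  ("DevOps", ["docker", "kubernetes", "aws", "azure", "gcp", "git"]),
  ("Algorithms", ["sorting", "searching", "dynamic programming", "greedy", "recursion", "backtracking"]),
  ("Data Structures", ["arrays", "linked lists", "trees", "graphs", "hash tables", "stacks", "queues"]),
  ("Code Quality", ["clean code", "testing", "refactoring", "design patterns", "code review"])]

-- A's body applied to the already-lowered tag name (A computes tag_name.lower() first and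
-- uses only that value afterwards).
def pvABody (l : String) : List String :=
  -- scan over all category definitions
  let additional_parents : List String :=
    TAG_CATEGORIES.foldl (fun acc p =>
      if l ∈ p.2.map PySem.Str.lower then acc ++ [p.1] else acc) []
  -- special-case if/elif chain
  let additional_parents :=
    if l ∈ (["typescript", "javascript"] : List String) then
      additional_parents ++ ["Languages", "Frontend"]
    else if l ∈ (["python", "java"] : List String) then
      additional_parents ++ ["Languages", "Backend"]
    else if l = "node.js" ∨ l = "nodejs" then
      additional_parents ++ ["Frameworks", "Backend"]
    else if l ∈ (["react", "angular", "vue", "vue.js"] : List String) then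
      additional_parents ++ ["Frameworks", "Frontend"]
    else if l ∈ (["django", "flask", "fastapi", "express"] : List String) then
      additional_parents ++ ["Frameworks", "Backend"]
    else additional_parents
  -- order-preserving dedup loop
  additional_parents.foldl (fun unique parent =>
    if parent ∈ unique then unique else unique ++ [parent]) []

def get_additional_parents (tag_name : String) : List String :=
  pvABody (PySem.Str.lower tag_name)

-- ===== PORT B =====
-- module-level inverted index: lowered tag -> ordered list of categories containing it
def pvIndex : PySem.Dict String (List String) :=
  TAG_CATEGORIES.foldl (fun d p =>
    p.2.foldl (fun d t =>
      let k := PySem.Str.lower t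
      d.insert k (d.getD k [] ++ [p.1])) d) PySem.Dict.empty

-- module-level table of the hard-coded multi-category extensions
def pvSpecial : PySem.Dict String (List String) := PySem.Dict.ofList [
  ("typescript", ["Languages", "Frontend"]),
  ("javascript", ["Languages", "Frontend"]),
  ("python", ["Languages", "Backend"]),
  ("java", ["Languages", "Backend"]),
  ("node.js", ["Frameworks", "Backend"]),
  ("nodejs", ["Frameworks", "Backend"]),
  ("react", ["Frameworks", "Frontend"]),
  ("angular", ["Frameworks", "Frontend"]),
  ("vue", ["Frameworks", "Frontend"]),
  ("vue.js", ["Frameworks", "Frontend"]),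
  ("django", ["Frameworks", "Backend"]),
  ("flask", ["Frameworks", "Backend"]),
  ("fastapi", ["Frameworks", "Backend"]),
  ("express", ["Frameworks", "Backend"])]

def get_additional_parents_alt (tag_name : String) : List String :=
  let tag_name_lower := PySem.Str.lower tag_name
  PySem.List.dedup (pvIndex.getD tag_name_lower [] ++ pvSpecial.getD tag_name_lower [])

-- ===== PRECONDITION & SPEC =====
def Spec_get_additional_parents (tag_name : String) (out : List String) : Prop := out = get_additional_parents_alt tag_name
instance (tag_name : String) (out : List String) : Decidable (Spec_get_additional_parents tag_name out) := by unfold Spec_get_additional_parents; infer_instance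

-- ===== CLAIM (what is proved, stated in full; the proofs are below) =====
def Claim_equal_get_additional_parents : Prop := ∀ (tag_name : String), Dom_get_additional_parents tag_name → Spec_get_additional_parents tag_name (get_additional_parents tag_name)

-- ===== LEMMAS AND PROOFS =====

-- every lowered tag name on which any branch of either program can fire
def pvAllKeys : List String := ["python", "javascript", "typescript", "java", "c++", "c#", "go", "rust", "php", "ruby", "swift", "kotlin", "react", "angular", "vue", "node.js", "express", "django", "flask", "fastapi", "rails", "sql", "mongodb", "postgresql", "mysql", "redis", "html", "css", "docker", "kubernetes", "aws", "azure", "gcp", "git", "sorting", "searching", "dynamic programming", "greedy", "recursion", "backtracking", "arrays", "linked lists", "trees", "graphs", "hash tables", "stacks", "queues", "clean code", "testing", "refactoring", "design patterns", "code review", "nodejs", "vue.js"]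

set_option maxRecDepth 8000 in
theorem pvCore (l : String) :
    pvABody l = PySem.List.dedup (pvIndex.getD l [] ++ pvSpecial.getD l []) := by
  by_cases hl : l ∈ pvAllKeys
  · simp only [pvAllKeys, List.mem_cons, List.not_mem_nil, or_false] at hl
    rcases hl with rfl|rfl|rfl|rfl|rfl|rfl|rfl|rfl|rfl|rfl|rfl|rfl|rfl|rfl|rfl|rfl|rfl|rfl|rfl|rfl|rfl|rfl|rfl|rfl|rfl|rfl|rfl|rfl|rfl|rfl|rfl|rfl|rfl|rfl|rfl|rfl|rfl|rfl|rfl|rfl|rfl|rfl|rfl|rfl|rfl|rfl|rfl|rfl|rfl|rfl|rfl|rfl|rfl|rfl <;> decide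
  · simp only [pvAllKeys, List.mem_cons, List.not_mem_nil, or_false, not_or] at hl
    obtain ⟨h1,h2,h3,h4,h5,h6,h7,h8,h9,h10,h11,h12,h13,h14,h15,h16,h17,h18,h19,h20,h21,h22,h23,h24,h25,h26,h27,h28,h29,h30,h31,h32,h33,h34,h35,h36,h37,h38,h39,h40,h41,h42,h43,h44,h45,h46,h47,h48,h49,h50,h51,h52,h53,h54⟩ := hl
    have hidx : pvIndex = PySem.Dict.mk [("python", ["Languages", "Backend"]), ("javascript", ["Languages"]), ("typescript", ["Languages", "Frontend"]), ("java", ["Languages", "Backend"]), ("c++", ["Languages"]), ("c#", ["Languages", "Backend"]), ("go", ["Languages", "Backend"]), ("rust", ["Languages", "Backend"]), ("php", ["Languages", "Backend"]), ("ruby", ["Languages"]), ("swift", ["Languages"]), ("kotlin", ["Languages"]), ("react", ["Frameworks", "Frontend"]), ("angular", ["Frameworks", "Frontend"]), ("vue", ["Frameworks", "Frontend"]), ("node.js", ["Frameworks", "Backend"]), ("express", ["Frameworks", "Backend"]), ("django", ["Frameworks", "Backend"]), ("flask", ["Frameworks", "Backend"]), ("fastapi", ["Frameworks", "Backend"]),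 ("rails", ["Frameworks"]), ("sql", ["Databases"]), ("mongodb", ["Databases"]), ("postgresql", ["Databases"]), ("mysql", ["Databases"]), ("redis", ["Databases"]), ("html", ["Frontend"]), ("css", ["Frontend"]), ("docker", ["DevOps"]), ("kubernetes", ["DevOps"]), ("aws", ["DevOps"]), ("azure", ["DevOps"]), ("gcp", ["DevOps"]), ("git", ["DevOps"]), ("sorting", ["Algorithms"]), ("searching", ["Algorithms"]), ("dynamic programming", ["Algorithms"]), ("greedy", ["Algorithms"]), ("recursion", ["Algorithms"]), ("backtracking", ["Algorithms"]), ("arrays", ["Data Structures"]), ("linked lists", ["Data Structures"]), ("trees", ["Data Structures"]), ("graphs", ["Data Structures"]), ("hash tables", ["Data Structures"]), ("stacks", ["Data Structures"]), ("queues", ["Data Structures"]), ("clean code", ["Code Quality"]), ("testing", ["Code Quality"]), ("refactoring", ["Code Quality"]), ("design patterns", ["Code Quality"]), ("code review", ["Code Quality"])] := by decide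
    have hsp : pvSpecial = PySem.Dict.mk [("typescript", ["Languages", "Frontend"]), ("javascript", ["Languages", "Frontend"]), ("python", ["Languages", "Backend"]), ("java", ["Languages", "Backend"]), ("node.js", ["Frameworks", "Backend"]), ("nodejs", ["Frameworks", "Backend"]), ("react", ["Frameworks", "Frontend"]), ("angular", ["Frameworks", "Frontend"]), ("vue", ["Frameworks", "Frontend"]), ("vue.js", ["Frameworks", "Frontend"]), ("django", ["Frameworks", "Backend"]), ("flask", ["Frameworks", "Backend"]), ("fastapi", ["Frameworks", "Backend"]), ("express", ["Frameworks", "Backend"])] := by decide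
    have m1 : (["python", "javascript", "typescript", "java", "c++", "c#", "go", "rust", "php", "ruby", "swift", "kotlin"] : List String).map PySem.Str.lower = ["python", "javascript", "typescript", "java", "c++", "c#", "go", "rust", "php", "ruby", "swift", "kotlin"] := by decide
    have m2 : (["react", "angular", "vue", "node.js", "express", "django", "flask", "fastapi", "rails"] : List String).map PySem.Str.lower = ["react", "angular", "vue", "node.js", "express", "django", "flask", "fastapi", "rails"] := by decide
    have m3 : (["sql", "mongodb", "postgresql", "mysql", "redis"] : List String).map PySem.Str.lower = ["sql", "mongodb", "postgresql", "mysql", "redis"] := by decide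
    have m4 : (["html", "css", "react", "angular", "vue", "typescript"] : List String).map PySem.Str.lower = ["html", "css", "react", "angular", "vue", "typescript"] := by decide
    have m5 : (["python", "node.js", "java", "c#", "php", "go", "rust", "express", "django", "flask", "fastapi"] : List String).map PySem.Str.lower = ["python", "node.js", "java", "c#", "php", "go", "rust", "express", "django", "flask", "fastapi"] := by decide
    have m6 : (["docker", "kubernetes", "aws", "azure", "gcp", "git"] : List String).map PySem.Str.lower = ["docker", "kubernetes", "aws", "azure", "gcp", "git"] := by decide
    have m7 : (["sorting", "searching", "dynamic programming", "greedy", "recursion", "backtracking"] : List String).map PySem.Str.lower = ["sorting", "searching", "dynamic programming", "greedy", "recursion", "backtracking"] := by decide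
    have m8 : (["arrays", "linked lists", "trees", "graphs", "hash tables", "stacks", "queues"] : List String).map PySem.Str.lower = ["arrays", "linked lists", "trees", "graphs", "hash tables", "stacks", "queues"] := by decide
    have m9 : (["clean code", "testing", "refactoring", "design patterns", "code review"] : List String).map PySem.Str.lower = ["clean code", "testing", "refactoring", "design patterns", "code review"] := by decide
    rw [hidx, hsp]
    simp only [pvABody, TAG_CATEGORIES, List.foldl, m1, m2, m3, m4, m5, m6, m7, m8, m9]
    simp [PySem.Dict.getD, PySem.Dict.get?,
      Ne.symm h1, Ne.symm h2, Ne.symm h3, Ne.symm h4, Ne.symm h5, Ne.symm h6, Ne.symm h7, Ne.symm h8, Ne.symm h9, Ne.symm h10, Ne.symm h11, Ne.symm h12, Ne.symm h13, Ne.symm h14, Ne.symm h15, Ne.symm h16, Ne.symm h17, Ne.symm h18, Ne.symm h19, Ne.symm h20, Ne.symm h21, Ne.symm h22, Ne.symm h23, Ne.symm h24, Ne.symm h25, Ne.symm h26, Ne.symm h27, Ne.symm h28, Ne.symm h29, Ne.symm h30, Ne.symm h31, Ne.symm h32, Ne.symm h33, Ne.symm h34, Ne.symm h35, Ne.symm h36,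 Ne.symm h37, Ne.symm h38, Ne.symm h39, Ne.symm h40, Ne.symm h41, Ne.symm h42, Ne.symm h43, Ne.symm h44, Ne.symm h45, Ne.symm h46, Ne.symm h47, Ne.symm h48, Ne.symm h49, Ne.symm h50, Ne.symm h51, Ne.symm h52, Ne.symm h53, Ne.symm h54,
      h1, h2, h3, h4, h5, h6, h7, h8, h9, h10, h11, h12, h13, h14, h15, h16, h17, h18, h19, h20, h21, h22, h23, h24, h25, h26, h27, h28, h29, h30, h31, h32, h33, h34, h35, h36, h37, h38, h39, h40, h41, h42, h43, h44, h45, h46, h47, h48, h49, h50, h51, h52, h53, h54]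

-- ===== VERDICT (by name: the statement is the Claim_ definition above) =====
theorem get_additional_parents_spec : Claim_equal_get_additional_parents := by
  intro tag_name _
  show get_additional_parents tag_name = get_additional_parents_alt tag_name
  simpa [get_additional_parents, get_additional_parents_alt] using pvCore (PySem.Str.lower tag_name)
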